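-- pv_equiv track=rewrite | github.com/LoST-0/Portfolio | src/utils.py | get_string_attractor_from_bwt
-- ===== SOURCE A (Python) =====
-- def get_runs(bwt_text: str) -> list:
--     """
--     Identifies the start positions of each run in the Burrows-Wheeler Transform (BWT) text.
--
--     Args:
--         bwt_text: A string representing the BWT of the original text.
--
--     Returns:
--         A list of integers representing the start positions of each run in the BWT text.
--     """
--     runs = []
--     current_run_char = bwt_text[0]
--     run_start_position = 0
--
--     for i in range(1, len(bwt_text)):
--         if bwt_text[i] != current_run_char:
--             runs.append(run_start_position)
--             current_run_char = bwt_text[i]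
--             run_start_position = i
--
--
--     runs.append(run_start_position)
--     return runs
--
-- def __get_cyclic_rotations(text) -> list:
--     """
--     Generates all cyclic rotations of a given string.
--
--     Args:
--         text: A string to generate cyclic rotations for.
--
--     Returns:
--         A list of tuples, where each tuple contains a cyclic rotation and its original starting position.
--     """
--     return [(text[x:] + text[:x],x) for x in range(len(text))]
--
-- def get_string_attractor_from_bwt(text: str) -> list:
--     """
--     Generate the string attractor based on the BWT of the text.
--
--     Parameters:
--     bwt_text (str): The BWT of the text.
--     text (str): The original text (assumed to include the special symbol $ at the end).
--
--     Returns: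
--     list: The positions that form the string attractor.
--     """
--
--     rotations = __get_cyclic_rotations(text + "$")
--     rotations = sorted(rotations, key=lambda x: x[0])
--
--     bwt_text = ''.join([rotation[0][-1] for rotation in rotations])
--
--
--     run_positions_in_bwt = get_runs(bwt_text)
--
--     needed = [rotations[i][1] for i in run_positions_in_bwt]
--
--     needed.remove(0)
--
--     return sorted(needed)
-- ===== SOURCE B (Python) =====
-- def get_string_attractor_from_bwt(text: str) -> list:
--     """Predecessor-search re-implementation: no sorting at all. For each
--     candidate position p of s = text+'$' (p = 1..n-1), brute-force the
--     lexicographic predecessor of suffix s[p:] among all other suffixes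
--     (with a unique '$' this is the rotation order A sorts by); p belongs to
--     the attractor iff its suffix is the smallest one, or the predecessor's
--     preceding character (its BWT character) differs from s[p-1]. Scanning p
--     in increasing order yields the result already sorted."""
--     s = text + "$"
--     n = len(s)
--     suf = [s[i:] for i in range(n)]
--     out = []
--     for p in range(1, n):
--         pred = None
--         for q in range(n):
--             if q != p and suf[q] < suf[p] and (pred is None or suf[q] > suf[pred]):
--                 pred = q
--         if pred is None or s[pred - 1] != s[p - 1]:
--             out.append(p)
--     return out
-- ===== Notes on version B (the rewrite author's own statement) =====
-- stated objective: alternative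
-- what changed: B eliminates sorting entirely: instead of sorting rotations, joining a BWT string, scanning runs and removing position 0, it decides membership per position by a brute-force search for the lexicographic predecessor suffix (whose preceding character is the neighbouring BWT character) and emits positions in increasing order directly.
-- outside the precondition, e.g. on get_string_attractor_from_bwt('$'): A returns [], B returns [1]; on get_string_attractor_from_bwt('a$'): A raises ValueError, B returns [1, 2]
import Mathlib
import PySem

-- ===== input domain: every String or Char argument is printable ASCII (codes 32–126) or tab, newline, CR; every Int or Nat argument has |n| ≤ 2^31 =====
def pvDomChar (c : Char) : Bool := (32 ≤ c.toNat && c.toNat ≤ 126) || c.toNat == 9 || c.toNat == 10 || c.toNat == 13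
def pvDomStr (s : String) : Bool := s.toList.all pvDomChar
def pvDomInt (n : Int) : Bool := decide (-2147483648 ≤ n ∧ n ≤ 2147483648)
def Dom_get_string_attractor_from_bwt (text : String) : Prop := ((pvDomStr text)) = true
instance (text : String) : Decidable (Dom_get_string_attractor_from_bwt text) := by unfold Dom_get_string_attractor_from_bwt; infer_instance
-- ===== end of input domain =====

-- B drops A's sorting pipeline entirely: it decides membership per position by a
-- brute-force lexicographic-predecessor search over the suffixes; alternative
-- algorithm of similar character cost, no speed claim.

-- ===== PORT A =====
-- get_runs: the loop over range(1, len(bwt_text)) with state (current_run_char, run_start_position, runs)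
def pvARunsGo : List Char → Char → Int → Int → List Int → List Int
  | [], _, start, _, runs => runs ++ [start]
  | d :: t, cur, start, i, runs =>
    if d ≠ cur then pvARunsGo t d i (i + 1) (runs ++ [start])
    else pvARunsGo t cur start (i + 1) runs

def pvGetRuns (cs : List Char) : List Int :=
  match cs with
  | [] => []        -- Python raises IndexError on bwt_text[0]; unreachable: the bwt here is never empty
  | c :: rest => pvARunsGo rest c 0 1 []

-- __get_cyclic_rotations body: text[x:] + text[:x]
def pvRot (s : List Char) (x : Int) : List Char :=
  PySem.List.slice s (some x) none ++ PySem.List.slice s none (some x)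

def get_string_attractor_from_bwt (text : String) : List Int :=
  let s : List Char := text.toList ++ ['$']                       -- text + "$"
  let rotations := (PySem.List.pyRange 0 (s.length : Int) 1).map (fun x => (pvRot s x, x))
  let rotations' := PySem.List.sorted rotations (fun r => r.1) false
  -- ''.join([rotation[0][-1] for rotation in rotations]); rotation strings are nonempty so [-1] never raises
  let bwt : List Char := rotations'.map (fun r => (PySem.List.pyGet? r.1 (-1)).getD ' ')
  let runPos := pvGetRuns bwt
  let needed := runPos.map (fun i => ((PySem.List.pyGet? rotations' i).getD ([], 0)).2)
  -- needed.remove(0); ValueError (0 absent) is excluded by Pre_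
  let needed' := (PySem.List.remove? needed 0).getD needed
  PySem.List.sorted needed' (fun x => x) false

-- ===== PORT B =====
-- s[p-1]: the BWT character of the rotation starting at p (p = 0 wraps to the final '$', as in Python)
def pvBChar (s : List Char) (p : Int) : Char :=
  (PySem.List.pyGet? s (p - 1)).getD ' '

-- suf[i] (the indices used come from range(n), so the lookup never raises)
def pvSufAt (suf : List (List Char)) (i : Int) : List Char :=
  (PySem.List.pyGet? suf i).getD []

-- inner loop: for q in range(n): if q != p and suf[q] < suf[p] and (pred is None or suf[q] > suf[pred]): pred = q
def pvBPredLoop (suf : List (List Char)) (p : Int) (qs : List Int) : Option Int :=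
  qs.foldl (fun pred q =>
    if q ≠ p ∧ pvSufAt suf q < pvSufAt suf p ∧
        (pred = none ∨ pvSufAt suf (pred.getD 0) < pvSufAt suf q) then some q else pred) none

def get_string_attractor_from_bwt_alt (text : String) : List Int :=
  let s : List Char := text.toList ++ ['$']
  let n : Int := (s.length : Int)
  let suf := (PySem.List.pyRange 0 n 1).map (fun i => PySem.List.slice s (some i) none)
  (PySem.List.pyRange 1 n 1).foldl (fun out p =>
    let pred := pvBPredLoop suf p (PySem.List.pyRange 0 n 1)
    if pred = none ∨ pvBChar s (pred.getD 0) ≠ pvBChar s p then out ++ [p] else out) []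

-- ===== PRECONDITION & SPEC =====
-- Pre_ excludes texts containing '$': the appended sentinel is then not unique, so A's
-- rotation order is accidental (and A raises ValueError in needed.remove(0) on many of them),
-- while B's suffix-based method needs a unique sentinel.
def Pre_get_string_attractor_from_bwt (text : String) : Prop := '$' ∉ text.toList
instance (text : String) : Decidable (Pre_get_string_attractor_from_bwt text) := by
  unfold Pre_get_string_attractor_from_bwt; infer_instance

def pvWitness_get_string_attractor_from_bwt : String := "abracadabra"

def Spec_get_string_attractor_from_bwt (text : String) (out : List Int) : Prop := out = get_string_attractor_from_bwt_alt text
instance (text : String) (out : List Int) : Decidable (Spec_get_string_attractor_from_bwt text out) := by unfold Spec_get_string_attractor_from_bwt; infer_instance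

-- ===== CLAIM (what is proved, stated in full; the proofs are below) =====
def Claim_equal_get_string_attractor_from_bwt : Prop := ∀ (text : String), Dom_get_string_attractor_from_bwt text → Pre_get_string_attractor_from_bwt text → Spec_get_string_attractor_from_bwt text (get_string_attractor_from_bwt text)

-- ===== LEMMAS AND PROOFS =====

-- positions (as running indices) at which the char changes
def pvChanges : List Char → Char → Int → List Int
  | [], _, _ => []
  | d :: t, cur, i => if d ≠ cur then i :: pvChanges t d (i + 1) else pvChanges t cur (i + 1)

-- run-start VALUES of a (char, value) list: the value of every pair whose char differs from prev
def pvSel : List (Char × Int) → Option Char → List Int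
  | [], _ => []
  | (c, v) :: t, prev => if some c ≠ prev then v :: pvSel t (some c) else pvSel t prev

lemma pvARunsGo_eq (rest : List Char) : ∀ (cur : Char) (start i : Int) (runs : List Int),
    pvARunsGo rest cur start i runs = runs ++ start :: pvChanges rest cur i := by
  induction rest with
  | nil => intro cur start i runs; simp [pvARunsGo, pvChanges]
  | cons d t ih =>
    intro cur start i runs
    by_cases h : d = cur
    · simp [pvARunsGo, pvChanges, h, ih]
    · simp [pvARunsGo, pvChanges, h, ih]

lemma map_lookup_changes {α : Type} (ch : α → Char) (v : α → Int) (dflt : α) :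
    ∀ (suf pre : List α) (cur : Char),
    (pvChanges (suf.map ch) cur (pre.length : Int)).map
        (fun i => v ((PySem.List.pyGet? (pre ++ suf) i).getD dflt))
      = pvSel (suf.map (fun a => (ch a, v a))) (some cur) := by
  intro suf
  induction suf with
  | nil => intro pre cur; simp [pvChanges, pvSel]
  | cons a t ih =>
    intro pre cur
    have hlook : PySem.List.pyGet? (pre ++ a :: t) (pre.length : Int) = some a :=
      PySem.List.pyGet?_append_length pre t a
    have hlen : ((pre ++ [a]).length : Int) = (pre.length : Int) + 1 := by
      simp
    have := ih (pre ++ [a]) (ch a)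
    rw [hlen] at this
    simp only [List.append_assoc, List.cons_append, List.nil_append] at this
    by_cases h : ch a = cur
    · cases h; simpa [pvChanges, pvSel] using this
    · simp [pvChanges, pvSel, h, this]

-- A's needed list (run positions looked up in the sorted pair list) is pvSel
lemma aNeeded_eq {α : Type} (cf : α → Char) (v : α → Int) (dflt : α) (r0 : α) (P' : List α) :
    (pvGetRuns ((r0 :: P').map cf)).map (fun i => v ((PySem.List.pyGet? (r0 :: P') i).getD dflt))
      = pvSel ((r0 :: P').map (fun a => (cf a, v a))) none := by
  simp only [List.map_cons, pvGetRuns]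
  rw [pvARunsGo_eq]
  rw [← List.singleton_append (l := P')]
  have h1 : (1 : Int) = (([r0] : List α).length : Int) := by simp
  rw [h1]
  simp only [List.nil_append, List.map_cons]
  rw [map_lookup_changes cf v dflt P' [r0] (cf r0)]
  simp [pvSel]

lemma pvSel_sublist : ∀ (l : List (Char × Int)) (prev : Option Char),
    (pvSel l prev).Sublist (l.map Prod.snd) := by
  intro l
  induction l with
  | nil => intro prev; simp [pvSel]
  | cons q t ih =>
    intro prev
    obtain ⟨c, v⟩ := q
    by_cases h : some c = prev
    · simpa [pvSel, h] using (ih prev).cons v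
    · simpa [pvSel, h] using (ih (some c)).cons₂ v

-- the 'is a run start' condition of a value relative to the element just before it
def pvPrevCond (c : Int → Char) (v : Int) (prev : Option Char) : Option Int → Prop
  | none => some (c v) ≠ prev
  | some q => c v ≠ c q

lemma pvPrevCond_cons (c : Int → Char) (v a : Int) (x : Option Char) (u' : List Int) :
    pvPrevCond c v x ((a :: u').getLast?) ↔ pvPrevCond c v (some (c a)) u'.getLast? := by
  cases u' with
  | nil => simp [pvPrevCond]
  | cons b t =>
    rw [List.getLast?_cons_cons]
    cases hy : (b :: t).getLast? with
    | none => simp at hy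
    | some y => simp [pvPrevCond]
lemma mem_pvSel_map_iff (c : Int → Char) :
    ∀ (l : List Int) (prev : Option Char) (v : Int),
    v ∈ pvSel (l.map (fun p => (c p, p))) prev ↔
      ∃ u w, l = u ++ v :: w ∧ pvPrevCond c v prev u.getLast? := by
  intro l
  induction l with
  | nil =>
    intro prev v
    simp [pvSel]
  | cons a t ih =>
    intro prev v
    rw [show ((a :: t).map (fun p => (c p, p))) = (c a, a) :: t.map (fun p => (c p, p)) from rfl]
    by_cases h : some (c a) = prev
    · -- not selected; prev stays (and equals some (c a))
      simp only [pvSel, ne_eq, h, not_true_eq_false, if_false]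
      rw [← h, ih (some (c a)) v]
      constructor
      · rintro ⟨u', w, rfl, hc⟩
        exact ⟨a :: u', w, rfl, (pvPrevCond_cons c v a (some (c a)) u').2 hc⟩
      · rintro ⟨u, w, hsplit, hc⟩
        cases u with
        | nil =>
          simp only [List.nil_append, List.cons.injEq] at hsplit
          obtain ⟨rfl, rfl⟩ := hsplit
          exfalso
          simp [pvPrevCond] at hc
        | cons a2 u' =>
          simp only [List.cons_append, List.cons.injEq] at hsplit
          obtain ⟨rfl, rfl⟩ := hsplit
          exact ⟨u', w, rfl, (pvPrevCond_cons c v a (some (c a)) u').1 hc⟩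
    · -- selected
      simp only [pvSel, ne_eq, h, not_false_iff, if_true, List.mem_cons]
      rw [ih (some (c a)) v]
      constructor
      · rintro (rfl | ⟨u', w, rfl, hc⟩)
        · exact ⟨[], t, rfl, by simpa [pvPrevCond] using h⟩
        · exact ⟨a :: u', w, rfl, (pvPrevCond_cons c v a prev u').2 hc⟩
      · rintro ⟨u, w, hsplit, hc⟩
        cases u with
        | nil =>
          simp only [List.nil_append, List.cons.injEq] at hsplit
          exact Or.inl hsplit.1.symm
        | cons a2 u' =>
          simp only [List.cons_append, List.cons.injEq] at hsplit
          obtain ⟨rfl, rfl⟩ := hsplit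
          exact Or.inr ⟨u', w, rfl, (pvPrevCond_cons c v a prev u').1 hc⟩

-- the inner predecessor loop: invariant specification of the fold
lemma predloop_spec (k : Int → List Char) (p : Int) :
    ∀ (l : List Int) (acc : Option Int),
    (∀ b, acc = some b → b ≠ p ∧ k b < k p) →
    ((l.foldl (fun pred q => if q ≠ p ∧ k q < k p ∧ (pred = none ∨ k (pred.getD 0) < k q) then some q else pred) acc = none →
        acc = none ∧ ∀ q ∈ l, q ≠ p → ¬ k q < k p) ∧
     (∀ a, l.foldl (fun pred q => if q ≠ p ∧ k q < k p ∧ (pred = none ∨ k (pred.getD 0) < k q) then some q else pred) acc = some a →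
        a ≠ p ∧ k a < k p ∧ (a ∈ l ∨ acc = some a) ∧
        (∀ q ∈ l, q ≠ p → k q < k p → k q ≤ k a) ∧
        (∀ b, acc = some b → k b ≤ k a))) := by
  intro l
  induction l with
  | nil =>
    intro acc hacc
    constructor
    · intro h
      simp only [List.foldl_nil] at h
      exact ⟨h, by simp⟩
    · intro a ha
      simp only [List.foldl_nil] at ha
      obtain ⟨h1, h2⟩ := hacc a ha
      exact ⟨h1, h2, Or.inr ha, by simp, fun b hb => by rw [ha] at hb; cases hb; exact le_rfl⟩
  | cons q0 t ih =>
    intro acc hacc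
    simp only [List.foldl_cons]
    by_cases hc : q0 ≠ p ∧ k q0 < k p ∧ (acc = none ∨ k (acc.getD 0) < k q0)
    · rw [if_pos hc]
      have hacc' : ∀ b, (some q0 : Option Int) = some b → b ≠ p ∧ k b < k p := by
        rintro b hb; cases hb; exact ⟨hc.1, hc.2.1⟩
      obtain ⟨ihn, ihs⟩ := ih (some q0) hacc'
      constructor
      · intro hres
        exact absurd (ihn hres).1 (by simp)
      · intro a hres
        obtain ⟨h1, h2, h3, h4, h5⟩ := ihs a hres
        have hq0a : k q0 ≤ k a := h5 q0 rfl
        refine ⟨h1, h2, ?_, ?_, ?_⟩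
        · rcases h3 with h | h
          · exact Or.inl (List.mem_cons_of_mem _ h)
          · cases h; exact Or.inl (List.mem_cons_self)
        · intro q hq hqp hqlt
          rcases List.mem_cons.1 hq with rfl | hq
          · exact hq0a
          · exact h4 q hq hqp hqlt
        · intro b hb
          rcases hc.2.2 with hn | hlt
          · rw [hn] at hb; cases hb
          · obtain ⟨bb, hbb⟩ : ∃ bb, acc = some bb := by
              cases acc with
              | none => simp at hlt; exact ⟨b, by rw [hb]⟩
              | some x => exact ⟨x, rfl⟩
            rw [hbb] at hb hlt; cases hb
            simp at hlt
            exact le_of_lt (lt_of_lt_of_le hlt hq0a)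
    · rw [if_neg hc]
      obtain ⟨ihn, ihs⟩ := ih acc hacc
      constructor
      · intro hres
        obtain ⟨h1, h2⟩ := ihn hres
        refine ⟨h1, ?_⟩
        intro q hq hqp hqlt
        rcases List.mem_cons.1 hq with rfl | hq
        · exact hc ⟨hqp, hqlt, Or.inl h1⟩
        · exact h2 q hq hqp hqlt
      · intro a hres
        obtain ⟨h1, h2, h3, h4, h5⟩ := ihs a hres
        refine ⟨h1, h2, ?_, ?_, h5⟩
        · rcases h3 with h | h
          · exact Or.inl (List.mem_cons_of_mem _ h)
          · exact Or.inr h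
        · intro q hq hqp hqlt
          rcases List.mem_cons.1 hq with rfl | hq
          · -- q0 is a candidate but the if failed: so acc = some b with ¬ k b < k q0
            by_contra hgt
            push Not at hgt
            cases hacc2 : acc with
            | none => exact hc ⟨hqp, hqlt, Or.inl hacc2⟩
            | some b =>
              have hble : ¬ k b < k q := by
                intro hblt
                exact hc ⟨hqp, hqlt, Or.inr (by rw [hacc2]; simpa using hblt)⟩
              have hba := h5 b hacc2
              exact hble (lt_of_le_of_lt hba hgt)
          · exact h4 q hq hqp hqlt

lemma lex_append {a b : List Char} (x y : List Char)
    (h : List.Lex (· < ·) a b) (hp : ¬ a <+: b) : List.Lex (· < ·) (a ++ x) (b ++ y) := by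
  induction h with
  | nil => exact absurd (List.nil_prefix) hp
  | @rel a' as b' bs hr => exact List.Lex.rel hr
  | @cons a' as bs hlex ih =>
    exact List.Lex.cons (ih (fun hpre => hp (List.cons_prefix_cons.2 ⟨rfl, hpre⟩)))

lemma drop_not_prefix {t : List Char} (h : '$' ∉ t) {i j : Nat}
    (hi : i < t.length + 1) (hj : j < t.length + 1) (hne : i ≠ j) :
    ¬ ((t ++ ['$']).drop i <+: (t ++ ['$']).drop j) := by
  intro hp
  set s := t ++ ['$'] with hs
  have hslen : s.length = t.length + 1 := by simp [hs]
  have hlen : s.length - i ≤ s.length - j := by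
    have := hp.length_le
    simp at this
    omega
  have hji : j < i := by omega
  have hdi : (s.drop i).length = s.length - i := by simp
  have hlast : (s.drop i)[s.length - i - 1]? = some '$' := by
    rw [List.getElem?_drop]
    have e : i + (s.length - i - 1) = t.length := by omega
    rw [e, hs]
    simp
  obtain ⟨r, hr⟩ := hp
  have h2 : s[j + (s.length - i - 1)]? = some '$' := by
    rw [← List.getElem?_drop, ← hr, List.getElem?_append_left (by omega)]
    exact hlast
  have hidx : j + (s.length - i - 1) < t.length := by omega
  rw [hs, List.getElem?_append_left (by omega)] at h2
  exact h (List.mem_of_getElem? h2)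

lemma rot_lt_of_suffix_lt {t : List Char} (h : '$' ∉ t) {i j : Nat}
    (hi : i < t.length + 1) (hj : j < t.length + 1) (hne : i ≠ j)
    (hlt : (t ++ ['$']).drop i < (t ++ ['$']).drop j) :
    ((t ++ ['$']).drop i ++ (t ++ ['$']).take i) < ((t ++ ['$']).drop j ++ (t ++ ['$']).take j) :=
  lex_append _ _ hlt (drop_not_prefix h hi hj hne)

lemma sorted_inst_irrel {α κ : Type} (i1 i2 : LT κ) (d1 : @DecidableLT κ i1)
    (d2 : @DecidableLT κ i2) (h : i1 = i2) (xs : List α) (key : α → κ) (r : Bool) :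
    @PySem.List.sorted α κ i1 d1 xs key r = @PySem.List.sorted α κ i2 d2 xs key r := by
  subst h
  have hd : d1 = d2 := by funext a b; exact Subsingleton.elim _ _
  rw [hd]

lemma sorted_rotations_eq {t : List Char} (h : '$' ∉ t) :
    PySem.List.sorted ((PySem.List.pyRange 0 ((t ++ ['$']).length : Int) 1).map
        (fun x => (pvRot (t ++ ['$']) x, x))) (fun r => r.1) false
      = (PySem.List.sorted (PySem.List.pyRange 0 ((t ++ ['$']).length : Int) 1)
          (fun i => PySem.List.slice (t ++ ['$']) (some i) none) false).map
          (fun i => (pvRot (t ++ ['$']) i, i)) := by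
  set s := t ++ ['$'] with hs
  set key := fun i => PySem.List.slice s (some i) none with hkey
  have hpw := PySem.List.sorted_pairwise (PySem.List.pyRange 0 (s.length : Int) 1) key
  set SA := @PySem.List.sorted Int (List Char) List.instLinearOrder.toLT
      LinearOrder.toDecidableLT (PySem.List.pyRange 0 (s.length : Int) 1) key false with hSA
  have hperm : SA.Perm (PySem.List.pyRange 0 (s.length : Int) 1) :=
    @PySem.List.sorted_perm Int (List Char) List.instLinearOrder.toLT
      LinearOrder.toDecidableLT (PySem.List.pyRange 0 (s.length : Int) 1) key false
  have hnodup : SA.Nodup := hperm.symm.nodup (PySem.List.nodup_pyRange_one _ _)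
  have hmem : ∀ a ∈ SA, 0 ≤ a ∧ a < (s.length : Int) := by
    intro a ha
    exact (PySem.List.mem_pyRange_one).1 (hperm.mem_iff.1 ha)
  have hpw2 : (SA.map (fun i => (pvRot s i, i))).Pairwise
      (fun a b => (fun r : List Char × Int => r.1) a < (fun r : List Char × Int => r.1) b) := by
    rw [List.pairwise_map]
    have hand := hpw.and (List.Pairwise.imp (fun hne => hne) hnodup)
    refine hand.imp_of_mem ?_
    intro a b ha hb hab
    obtain ⟨hle, hne⟩ := hab
    obtain ⟨ha0, haN⟩ := hmem a ha
    obtain ⟨hb0, hbN⟩ := hmem b hb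
    obtain ⟨a', rfl⟩ : ∃ k : Nat, a = (k : Int) := ⟨a.toNat, (Int.toNat_of_nonneg ha0).symm⟩
    obtain ⟨b', rfl⟩ : ∃ k : Nat, b = (k : Int) := ⟨b.toNat, (Int.toNat_of_nonneg hb0).symm⟩
    have hsl : (s.length : Int) = (t.length : Int) + 1 := by simp [hs]
    have ha' : a' < t.length + 1 := by omega
    have hb' : b' < t.length + 1 := by omega
    have hne' : a' ≠ b' := by omega
    have hkeya : key ((a' : Nat) : Int) = s.drop a' := by
      simp [hkey, PySem.List.slice_from_natCast]
    have hkeyb : key ((b' : Nat) : Int) = s.drop b' := by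
      simp [hkey, PySem.List.slice_from_natCast]
    have hkne : key ((a' : Nat) : Int) ≠ key ((b' : Nat) : Int) := by
      rw [hkeya, hkeyb]
      intro he
      have := congrArg List.length he
      simp [hs] at this
      omega
    have hklt := lt_of_le_of_ne hle hkne
    rw [hkeya, hkeyb] at hklt
    have hres := rot_lt_of_suffix_lt h ha' hb' hne' hklt
    simpa [pvRot, PySem.List.slice_from_natCast, PySem.List.slice_to_natCast, hs] using hres
  have hperm2 : (SA.map (fun i => (pvRot s i, i))).Perm
      ((PySem.List.pyRange 0 (s.length : Int) 1).map (fun x => (pvRot s x, x))) :=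
    hperm.map _
  have hfinal := @PySem.List.sorted_eq_of_perm_of_pairwise_lt (List Char × Int) (List Char)
      List.instLinearOrder
      ((PySem.List.pyRange 0 (s.length : Int) 1).map (fun x => (pvRot s x, x)))
      (SA.map (fun i => (pvRot s i, i))) (fun r => r.1) hperm2 hpw2
  refine (sorted_inst_irrel _ List.instLinearOrder.toLT _ LinearOrder.toDecidableLT rfl _ _ _).trans (hfinal.trans ?_)
  exact congrArg (List.map (fun i => (pvRot s i, i)))
    (sorted_inst_irrel List.instLinearOrder.toLT _ LinearOrder.toDecidableLT _ rfl _ _ _)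

-- ===== VERDICT (by name: the statement is the Claim_ definition above) =====
set_option maxHeartbeats 1000000 in
theorem get_string_attractor_from_bwt_spec : Claim_equal_get_string_attractor_from_bwt := by
  intro text _ hpre
  unfold Spec_get_string_attractor_from_bwt
  have hpre' : '$' ∉ text.toList := hpre
  simp only [get_string_attractor_from_bwt, get_string_attractor_from_bwt_alt]
  rw [sorted_rotations_eq hpre']
  set t := text.toList with ht
  set s := t ++ ['$'] with hs
  set key := fun i : Int => PySem.List.slice s (some i) none with hkey
  set R := PySem.List.pyRange 0 (s.length : Int) 1 with hR
  set SA := PySem.List.sorted R key false with hSA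
  set suf := R.map key with hsuf
  set f := fun i : Int => (pvRot s i, i) with hf
  set ch := fun r : List Char × Int => (PySem.List.pyGet? r.1 (-1)).getD ' ' with hch
  set pf := fun i : Int => (pvBChar s i, i) with hpf
  have hperm : SA.Perm R := PySem.List.sorted_perm _ _ _
  have hnodup : SA.Nodup := hperm.symm.nodup (PySem.List.nodup_pyRange_one _ _)
  have hmem : ∀ a ∈ SA, 0 ≤ a ∧ a < (s.length : Int) := fun a ha =>
    (PySem.List.mem_pyRange_one).1 (hperm.mem_iff.1 ha)
  have hslen : s.length = t.length + 1 := by simp [hs]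
  -- the BWT character of a rotation is the character before its start position
  have hchar : ∀ i ∈ SA, ch (f i) = pvBChar s i := by
    intro i hi
    obtain ⟨h0, hN⟩ := hmem i hi
    obtain ⟨k, rfl⟩ : ∃ k : Nat, i = (k : Int) := ⟨i.toNat, (Int.toNat_of_nonneg h0).symm⟩
    have hk : k < s.length := by omega
    have hrot : pvRot s ((k : Nat) : Int) = s.drop k ++ s.take k := by
      simp [pvRot, PySem.List.slice_from_natCast, PySem.List.slice_to_natCast]
    rcases Nat.eq_zero_or_pos k with hk0 | hk1
    · subst hk0
      simp only [hch, hf, hrot, pvBChar]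
      rw [PySem.List.pyGet?_neg_one]
      norm_num
      rw [PySem.List.pyGet?_neg_one]
    · have htk : s.take k ≠ [] := by
        simp [List.take_eq_nil_iff]
        constructor
        · omega
        · simp [hs]
      simp only [hch, hf, hrot, pvBChar]
      have htake : (s.take k).getLast? = s[k - 1]? := by
        rw [List.getLast?_eq_getElem?, List.length_take]
        have hmin : min k s.length - 1 = k - 1 := by omega
        rw [hmin, List.getElem?_take, if_pos (by omega)]
      rw [PySem.List.pyGet?_neg_one, List.getLast?_append, htake]
      have hcast : ((k : Nat) : Int) - 1 = ((k - 1 : Nat) : Int) := by omega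
      rw [hcast, PySem.List.pyGet?_natCast]
      rw [List.getElem?_eq_getElem (by omega)]
      simp
  -- SA is nonempty
  have hne : SA ≠ [] := by
    intro h0
    have hlen := hperm.length_eq
    rw [h0] at hlen
    rw [hR, PySem.List.length_pyRange_one] at hlen
    simp [hslen] at hlen
  obtain ⟨i0, SA', hcons⟩ := List.exists_cons_of_ne_nil hne
  -- A's needed list equals pvSel over the (char, position) pairs
  have hA : (pvGetRuns ((SA.map f).map ch)).map
      (fun i => ((PySem.List.pyGet? (SA.map f) i).getD ([], 0)).2)
        = pvSel (SA.map pf) none := by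
    rw [hcons, List.map_cons]
    rw [aNeeded_eq ch Prod.snd ([], 0) (f i0) (SA'.map f)]
    rw [← List.map_cons, ← hcons, List.map_map]
    have hmapeq : SA.map ((fun a : List Char × Int => (ch a, a.2)) ∘ f) = SA.map pf := by
      refine List.map_congr_left ?_
      intro i hi
      simp only [Function.comp, hpf]
      rw [hchar i hi]
    rw [hmapeq]
  set N := pvSel (SA.map pf) none with hN
  have hNnodup : N.Nodup := by
    have hsub := pvSel_sublist (SA.map pf) none
    have : (SA.map pf).map Prod.snd = SA := by
      rw [List.map_map]
      have hid : (Prod.snd ∘ fun i : Int => (pvBChar s i, i)) = id := rfl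
      rw [hpf, hid, List.map_id]
    rw [this] at hsub
    exact hsub.nodup hnodup
  -- membership in N via the run-start condition on the immediate predecessor in SA
  have hNmem : ∀ v : Int, v ∈ N ↔
      ∃ u w, SA = u ++ v :: w ∧ pvPrevCond (pvBChar s) v none u.getLast? := by
    intro v
    rw [hN, hpf]
    exact mem_pvSel_map_iff (pvBChar s) SA none v
  -- characters at positions ≥ 1 come from t and hence differ from '$'
  have hbchar0 : pvBChar s 0 = '$' := by
    simp only [pvBChar]
    norm_num
    rw [hs, PySem.List.pyGet?_neg_one_append_singleton]
    rfl
  have hcharne : ∀ q ∈ SA, q ≠ 0 → pvBChar s q ≠ '$' := by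
    intro q hqSA hq0
    obtain ⟨hq0', hqN⟩ := hmem q hqSA
    obtain ⟨k, rfl⟩ : ∃ k : Nat, q = (k : Int) := ⟨q.toNat, (Int.toNat_of_nonneg hq0').symm⟩
    have hk1 : 1 ≤ k := by
      rcases Nat.eq_zero_or_pos k with h | h
      · subst h; simp at hq0
      · omega
    have hkn : k < s.length := by omega
    have hbq : pvBChar s ((k : Nat) : Int) = (t[k - 1]?).getD ' ' := by
      simp only [pvBChar]
      have hcast : ((k : Nat) : Int) - 1 = ((k - 1 : Nat) : Int) := by omega
      rw [hcast, PySem.List.pyGet?_natCast, hs, List.getElem?_append_left (by omega)]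
    obtain ⟨c, hc⟩ : ∃ c, t[k - 1]? = some c := ⟨_, List.getElem?_eq_getElem (by omega)⟩
    rw [hbq, hc]
    intro hEq
    have hct : c ∈ t := List.mem_of_getElem? hc
    simp only [Option.getD_some] at hEq
    rw [hEq] at hct
    exact hpre' hct
  have h0SA : (0 : Int) ∈ SA := by
    rw [hperm.mem_iff, hR, PySem.List.mem_pyRange_one]
    constructor
    · omega
    · have : 1 ≤ s.length := by omega
      omega
  have h0N : (0 : Int) ∈ N := by
    obtain ⟨u, w, huw⟩ := List.append_of_mem h0SA
    refine (hNmem 0).2 ⟨u, w, huw, ?_⟩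
    cases hu : u.getLast? with
    | none => simp [pvPrevCond]
    | some q =>
      have hqu : q ∈ u := List.mem_of_getLast? hu
      have hqSA : q ∈ SA := by rw [huw]; exact List.mem_append_left _ hqu
      have hq0 : q ≠ 0 := by
        intro h0
        subst h0
        have hnd : (u ++ (0 : Int) :: w).Nodup := huw ▸ hnodup
        have h0um : (0 : Int) ∉ u ++ w := (List.nodup_cons.1 (List.nodup_middle.1 hnd)).1
        exact h0um (List.mem_append_left _ hqu)
      show pvBChar s 0 ≠ pvBChar s q
      rw [hbchar0]
      exact fun hEq => hcharne q hqSA hq0 hEq.symm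
  -- strict key order along SA
  have hkeylen : ∀ a ∈ SA, (key a).length = s.length - a.toNat := by
    intro a ha
    obtain ⟨h0, hN⟩ := hmem a ha
    obtain ⟨k, rfl⟩ : ∃ k : Nat, a = (k : Int) := ⟨a.toNat, (Int.toNat_of_nonneg h0).symm⟩
    simp [hkey, PySem.List.slice_from_natCast]
  have hSAlin : SA = @PySem.List.sorted Int (List Char) List.instLinearOrder.toLT
      LinearOrder.toDecidableLT R key false :=
    sorted_inst_irrel _ _ _ _ rfl R key false
  have hpwkey : SA.Pairwise (fun a b => key a < key b) := by
    have hpw : SA.Pairwise (fun a b => key a ≤ key b) := by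
      rw [hSAlin]; exact PySem.List.sorted_pairwise R key
    have hand := hpw.and (List.Pairwise.imp (fun hne => hne) hnodup)
    refine hand.imp_of_mem ?_
    intro a b ha hb hab
    obtain ⟨hle, hne2⟩ := hab
    refine lt_of_le_of_ne hle ?_
    intro he
    have hla := hkeylen a ha
    have hlb := hkeylen b hb
    obtain ⟨ha0, haN⟩ := hmem a ha
    obtain ⟨hb0, hbN⟩ := hmem b hb
    have := congrArg List.length he
    rw [hla, hlb] at this
    omega
  -- pvSufAt agrees with key on range indices
  have hsufAt : ∀ i ∈ R, pvSufAt suf i = key i := by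
    intro i hi
    obtain ⟨h0, hN⟩ := (PySem.List.mem_pyRange_one).1 (by rw [hR] at hi; exact hi)
    obtain ⟨k, rfl⟩ : ∃ k : Nat, i = (k : Int) := ⟨i.toNat, (Int.toNat_of_nonneg h0).symm⟩
    have hk : k < s.length := by omega
    simp only [pvSufAt, hsuf, hR]
    rw [PySem.List.pyGet?_natCast, PySem.List.getElem?_map_pyRange_zero key s.length k hk]
    rfl
  -- the predecessor loop computes the element just before p in SA
  have hpred : ∀ p u w, SA = u ++ p :: w → pvBPredLoop suf p R = u.getLast? := by
    intro p u w hsplit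
    have hpSA : p ∈ SA := by rw [hsplit]; exact List.mem_append_right _ (List.mem_cons_self)
    have hpR : p ∈ R := hperm.mem_iff.1 hpSA
    have hpwsplit := hsplit ▸ hpwkey
    have hndsplit := hsplit ▸ hnodup
    obtain ⟨hpwu, hpwpw, hcross⟩ := List.pairwise_append.1 hpwsplit
    have hforall_u : ∀ x ∈ u, x ≠ p ∧ key x < key p := by
      intro x hx
      have hlt : key x < key p := hcross x hx p (List.mem_cons_self)
      exact ⟨fun hxp => absurd (hxp ▸ hlt) (lt_irrefl _), hlt⟩
    have hforall_w : ∀ x ∈ w, key p < key x :=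
      fun x hx => (List.pairwise_cons.1 hpwpw).1 x hx
    have specs := predloop_spec (fun i => pvSufAt suf i) p R none (by rintro b ⟨⟩)
    simp only [] at specs
    cases hres : pvBPredLoop suf p R with
    | none =>
      have hno := (specs.1 hres).2
      cases hu : u.getLast? with
      | none => rfl
      | some g =>
        have hgu : g ∈ u := List.mem_of_getLast? hu
        have hgSA : g ∈ SA := by rw [hsplit]; exact List.mem_append_left _ hgu
        have hgR : g ∈ R := hperm.mem_iff.1 hgSA
        obtain ⟨hgp, hglt⟩ := hforall_u g hgu
        exact absurd (by rw [hsufAt g hgR, hsufAt p hpR]; exact hglt) (hno g hgR hgp)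
    | some a =>
      have hspec := specs.2 a hres
      obtain ⟨hap, halt, hainR, hmax, _⟩ := hspec
      have hain : a ∈ R := by
        rcases hainR with h | h
        · exact h
        · cases h
      have haSA : a ∈ SA := hperm.mem_iff.2 hain
      have haltk : key a < key p := by
        rw [hsufAt a hain, hsufAt p hpR] at halt
        exact halt
      have hau : a ∈ u := by
        rw [hsplit] at haSA
        rcases List.mem_append.1 haSA with h | h
        · exact h
        · rcases List.mem_cons.1 h with rfl | h
          · exact absurd rfl hap
          · exact absurd (lt_trans haltk (hforall_w a h)) (lt_irrefl _)
      have hune : u ≠ [] := List.ne_nil_of_mem hau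
      have hu : u.getLast? = some (u.getLast hune) := List.getLast?_eq_some_getLast hune
      rw [hu]
      set g := u.getLast hune with hg
      have hgu : g ∈ u := List.getLast_mem hune
      have hgSA : g ∈ SA := by rw [hsplit]; exact List.mem_append_left _ hgu
      have hgR : g ∈ R := hperm.mem_iff.1 hgSA
      obtain ⟨hgp, hglt⟩ := hforall_u g hgu
      have hkga : key g ≤ key a := by
        have := hmax g hgR hgp (by rw [hsufAt g hgR, hsufAt p hpR]; exact hglt)
        rw [hsufAt g hgR, hsufAt a hain] at this
        exact this
      have hag : a = g := by
        by_contra hne2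
        have hudl : u.dropLast ++ [g] = u := List.dropLast_append_getLast hune
        have hadrop : a ∈ u.dropLast := by
          rcases List.mem_append.1 (by rw [hudl]; exact hau) with h | h
          · exact h
          · rcases List.mem_cons.1 h with rfl | h
            · exact absurd rfl hne2
            · cases h
        have hpwu' : (u.dropLast ++ [g]).Pairwise (fun x y => key x < key y) := by
          rw [hudl]; exact hpwu
        obtain ⟨_, _, hcr⟩ := List.pairwise_append.1 hpwu'
        have : key a < key g := hcr a hadrop g (List.mem_cons_self)
        exact absurd hkga (not_le.2 this)
      rw [hag]
  -- B: the outer loop is a filter over range(1, n)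
  have hBfold : ∀ (l : List Int) (acc : List Int),
      l.foldl (fun out p =>
        if pvBPredLoop suf p R = none ∨
            pvBChar s ((pvBPredLoop suf p R).getD 0) ≠ pvBChar s p then out ++ [p] else out) acc
        = acc ++ l.filter (fun p => decide (pvBPredLoop suf p R = none ∨
            pvBChar s ((pvBPredLoop suf p R).getD 0) ≠ pvBChar s p)) := by
    intro l acc
    exact PySem.List.foldl_append_ite_eq_filter _ l acc
  -- membership equivalence between A's filtered needed list and B's filter
  have hmemiff : ∀ x : Int,
      x ∈ N.filter (fun p => decide (p ≠ 0)) ↔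
      x ∈ (PySem.List.pyRange 1 (s.length : Int) 1).filter
          (fun p => decide (pvBPredLoop suf p R = none ∨
            pvBChar s ((pvBPredLoop suf p R).getD 0) ≠ pvBChar s p)) := by
    intro x
    rw [List.mem_filter, List.mem_filter]
    simp only [decide_eq_true_eq]
    constructor
    · rintro ⟨hxN, hx0⟩
      obtain ⟨u, w, hsplit, hcond⟩ := (hNmem x).1 hxN
      have hxSA : x ∈ SA := by rw [hsplit]; exact List.mem_append_right _ (List.mem_cons_self)
      obtain ⟨hx0', hxN'⟩ := hmem x hxSA
      refine ⟨(PySem.List.mem_pyRange_one).2 ⟨by omega, hxN'⟩, ?_⟩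
      rw [hpred x u w hsplit]
      cases hu : u.getLast? with
      | none => exact Or.inl rfl
      | some g =>
        rw [hu] at hcond
        have hcond' : pvBChar s x ≠ pvBChar s g := hcond
        exact Or.inr (by simpa using hcond'.symm)
    · rintro ⟨hxr, hcond⟩
      obtain ⟨hx1, hxN'⟩ := (PySem.List.mem_pyRange_one).1 hxr
      have hxSA : x ∈ SA := hperm.mem_iff.2 (by
        rw [hR]; exact (PySem.List.mem_pyRange_one).2 ⟨by omega, hxN'⟩)
      obtain ⟨u, w, hsplit⟩ := List.append_of_mem hxSA
      refine ⟨(hNmem x).2 ⟨u, w, hsplit, ?_⟩, by omega⟩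
      rw [hpred x u w hsplit] at hcond
      cases hu : u.getLast? with
      | none => simp [pvPrevCond]
      | some g =>
        rw [hu] at hcond
        rcases hcond with h | h
        · cases h
        · show pvBChar s x ≠ pvBChar s g
          simpa using h.symm
  -- assemble
  rw [hA, hBfold]
  have hrm := PySem.List.remove?_eq_some_erase N 0 h0N
  rw [hrm]
  simp only [Option.getD_some, List.nil_append]
  rw [List.Nodup.erase_eq_filter hNnodup]
  have hfun : (fun x : Int => x != 0) = (fun p : Int => decide (p ≠ 0)) := by
    funext x
    simp only [bne, decide_not]
    by_cases h : x = 0 <;> simp [h]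
  rw [hfun]
  -- both sides: a sort of the same (nodup) set vs. the already-increasing filter
  set M := N.filter (fun p => decide (p ≠ 0)) with hM
  set B := (PySem.List.pyRange 1 (s.length : Int) 1).filter
      (fun p => decide (pvBPredLoop suf p R = none ∨
        pvBChar s ((pvBPredLoop suf p R).getD 0) ≠ pvBChar s p)) with hB
  have hMnodup : M.Nodup := hNnodup.filter _
  have hBnodup : B.Nodup := (PySem.List.nodup_pyRange_one _ _).filter _
  have hpermMB : B.Perm M := by
    rw [List.perm_ext_iff_of_nodup hBnodup hMnodup]
    intro a
    exact ((hmemiff a).symm)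
  have hBpw : B.Pairwise (fun a b => (fun x : Int => x) a < (fun x : Int => x) b) := by
    simpa using (PySem.List.pairwise_lt_pyRange_one 1 (s.length : Int)).filter _
  have hfinal := @PySem.List.sorted_eq_of_perm_of_pairwise_lt Int Int
      Int.instLinearOrder M B (fun x => x) hpermMB hBpw
  refine (sorted_inst_irrel _ Int.instLinearOrder.toLT _ LinearOrder.toDecidableLT rfl _ _ _).trans hfinal
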